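-- pv_equiv track=rewrite | github.com/HelenaCasademunt/chinese-model-honesty | inference/assistant_prefill_attack.py | match_prefills_to_questions
-- ===== SOURCE A (Python) =====
-- def match_prefills_to_questions(questions: list, prefills_data: dict) -> list:
--     """Match prefills from prefills_data to questions based on topic, subtopic, and index.
--
--     Modifies questions in-place to add 'prefill' field.
--     Returns the modified questions list.
--     """
--     # Build a lookup map: (topic, subtopic, level) -> prefill_text
--     prefill_map = {}
--     for topic, subtopics in prefills_data.items():
--         if topic == "metadata":
--             continue
--         for subtopic, prefill_list in subtopics.items():
--             for item in prefill_list: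
--                 key = (topic, subtopic, item.get("level"))
--                 prefill_map[key] = item.get("prefill", "")
--
--     # Match prefills to questions
--     for q in questions:
--         key = (q.get("topic"), q.get("subtopic"), q.get("level"))
--         if key in prefill_map:
--             q["prefill"] = prefill_map[key]
--         else:
--             q["prefill"] = ""
--
--     return questions
-- ===== SOURCE B (Python) =====
-- def match_prefills_to_questions(questions: list, prefills_data: dict) -> list:
--     """Attach prefill text to each question (in place) and return the list.
--
--     Every question starts with an empty prefill; questions are indexed by their
--     (topic, subtopic, level) key, and the prefill data is then pushed onto the
--     matching group of questions, later items overwriting earlier ones.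
--     """
--     groups = {}
--     for i, q in enumerate(questions):
--         q["prefill"] = ""
--         groups.setdefault((q.get("topic"), q.get("subtopic"), q.get("level")), []).append(i)
--
--     for topic, subtopics in prefills_data.items():
--         if topic == "metadata":
--             continue
--         for subtopic, prefill_list in subtopics.items():
--             for item in prefill_list:
--                 for i in groups.get((topic, subtopic, item.get("level")), []):
--                     questions[i]["prefill"] = item.get("prefill", "")
--
--     return questions
-- ===== Notes on version B (the rewrite author's own statement) =====
-- stated objective: alternative
-- what changed: Inverts the data flow: instead of building a prefill lookup dict and pulling a value per question, B initializes every question's prefill to "", groups question indices by (topic, subtopic, level), and pushes each prefill item onto its matching question group in data order so later items overwrite earlier ones.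
import Mathlib
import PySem

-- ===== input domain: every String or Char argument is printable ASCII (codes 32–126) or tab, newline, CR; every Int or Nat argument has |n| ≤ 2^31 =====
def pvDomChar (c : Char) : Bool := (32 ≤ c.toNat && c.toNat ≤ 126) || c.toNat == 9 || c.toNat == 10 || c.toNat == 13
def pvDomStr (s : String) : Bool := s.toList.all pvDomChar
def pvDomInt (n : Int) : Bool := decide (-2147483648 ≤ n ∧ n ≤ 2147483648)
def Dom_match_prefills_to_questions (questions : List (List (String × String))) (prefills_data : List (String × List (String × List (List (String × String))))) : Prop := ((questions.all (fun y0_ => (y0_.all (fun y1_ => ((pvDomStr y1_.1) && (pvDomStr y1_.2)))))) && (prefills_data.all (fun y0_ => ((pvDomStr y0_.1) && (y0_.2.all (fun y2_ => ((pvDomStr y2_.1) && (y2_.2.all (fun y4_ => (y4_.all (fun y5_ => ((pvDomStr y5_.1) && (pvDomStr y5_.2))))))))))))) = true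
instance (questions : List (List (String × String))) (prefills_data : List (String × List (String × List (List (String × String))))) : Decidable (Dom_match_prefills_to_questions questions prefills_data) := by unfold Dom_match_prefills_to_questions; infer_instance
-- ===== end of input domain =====

-- B inverts A's data flow: instead of building a prefill lookup dict and pulling one value per
-- question, B initializes every prefill to "", groups question indices by (topic, subtopic, level)
-- and pushes each prefill item onto its matching group, later items overwriting earlier ones.
-- Both A and B mutate the question dicts in place identically; the theorem is about the return value.


-- ===== PORT A =====
-- prefill_map : (topic, subtopic, level) -> prefill_text, built by three nested loops (last wins)
def match_prefills_to_questions (questions : List (List (String × String))) (prefills_data : List (String × List (String × List (List (String × String))))) : List (List (String × String)) :=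
  let prefill_map : PySem.Dict (Option String × Option String × Option String) String :=
    prefills_data.foldl (fun m tp =>
      if tp.1 == "metadata" then m
      else tp.2.foldl (fun m sp =>
        sp.2.foldl (fun m item =>
          m.insert (some tp.1, some sp.1, (PySem.Dict.mk item).get? "level")
                   ((PySem.Dict.mk item).getD "prefill" "")) m) m)
      PySem.Dict.empty
  questions.map (fun q =>
    let key := ((PySem.Dict.mk q).get? "topic", (PySem.Dict.mk q).get? "subtopic", (PySem.Dict.mk q).get? "level")
    if prefill_map.contains key then
      ((PySem.Dict.mk q).insert "prefill" (prefill_map.getD key "")).items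
    else
      ((PySem.Dict.mk q).insert "prefill" "").items)

-- ===== PORT B =====
-- first pass of Source B: one loop over enumerate(questions) sets q["prefill"] = "" and appends the
-- index to the question's (topic, subtopic, level) group (setdefault(...).append = modify)
def pvInitStep (st : List (PySem.Dict String String) × PySem.Dict (Option String × Option String × Option String) (List Int))
    (iq : Int × List (String × String)) : List (PySem.Dict String String) × PySem.Dict (Option String × Option String × Option String) (List Int) :=
  (st.1 ++ [(PySem.Dict.mk iq.2).insert "prefill" ""],
   st.2.modify ((((PySem.Dict.mk iq.2).insert "prefill" "").get? "topic",
                 (((PySem.Dict.mk iq.2).insert "prefill" "")).get? "subtopic",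
                 (((PySem.Dict.mk iq.2).insert "prefill" "")).get? "level")) [] (fun l => l ++ [iq.1]))

def match_prefills_to_questions_alt (questions : List (List (String × String))) (prefills_data : List (String × List (String × List (List (String × String))))) : List (List (String × String)) :=
  let st := (PySem.List.enumerate questions).foldl pvInitStep ([], PySem.Dict.empty)
  -- second pass of Source B: push each prefill item onto its matching question group
  let final := prefills_data.foldl (fun arr tp =>
    if tp.1 == "metadata" then arr
    else tp.2.foldl (fun arr sp =>
      sp.2.foldl (fun arr item =>
        (st.2.getD (some tp.1, some sp.1, (PySem.Dict.mk item).get? "level") []).foldl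
          (fun arr i =>
            PySem.List.pySetD arr i ((PySem.List.pyGetD arr i PySem.Dict.empty).insert "prefill" ((PySem.Dict.mk item).getD "prefill" "")))
          arr) arr) arr) st.1
  final.map (fun d => d.items)

-- ===== PRECONDITION & SPEC =====
def Spec_match_prefills_to_questions (questions : List (List (String × String))) (prefills_data : List (String × List (String × List (List (String × String))))) (out : List (List (String × String))) : Prop := out = match_prefills_to_questions_alt questions prefills_data
instance (questions : List (List (String × String))) (prefills_data : List (String × List (String × List (List (String × String))))) (out : List (List (String × String))) : Decidable (Spec_match_prefills_to_questions questions prefills_data out) := by unfold Spec_match_prefills_to_questions; infer_instance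

-- ===== CLAIM (what is proved, stated in full; the proofs are below) =====
def Claim_equal_match_prefills_to_questions : Prop := ∀ (questions : List (List (String × String))) (prefills_data : List (String × List (String × List (List (String × String))))), Dom_match_prefills_to_questions questions prefills_data → Spec_match_prefills_to_questions questions prefills_data (match_prefills_to_questions questions prefills_data)

-- ===== LEMMAS AND PROOFS =====

-- the (topic, subtopic, level) key of a question
def pvKey (q : List (String × String)) : Option String × Option String × Option String :=
  ((PySem.Dict.mk q).get? "topic", (PySem.Dict.mk q).get? "subtopic", (PySem.Dict.mk q).get? "level")

-- the prefill data flattened to (key, prefill) entries in iteration order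
def pvEntries (prefills_data : List (String × List (String × List (List (String × String))))) : List ((Option String × Option String × Option String) × String) :=
  prefills_data.flatMap (fun tp =>
    if tp.1 == "metadata" then []
    else tp.2.flatMap (fun sp =>
      sp.2.map (fun item =>
        ((some tp.1, some sp.1, (PySem.Dict.mk item).get? "level"),
         (PySem.Dict.mk item).getD "prefill" ""))))

-- the prefill both programs attach to a question with key k: the last matching entry, default ""
def pvLast (prefills_data : List (String × List (String × List (List (String × String))))) (k : Option String × Option String × Option String) : String :=
  match (pvEntries prefills_data).reverse.find? (fun e => e.1 == k) with
  | some e => e.2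
  | none => ""

-- ---- A side ----

-- folding inserts over a flat entry list: lookup is the LAST matching entry, i.e. the first in reverse
theorem pv_foldl_insert_get? (es : List ((Option String × Option String × Option String) × String))
    (d : PySem.Dict (Option String × Option String × Option String) String)
    (k : Option String × Option String × Option String) :
    (es.foldl (fun m e => m.insert e.1 e.2) d).get? k
      = match es.reverse.find? (fun e => e.1 == k) with
        | some e => some e.2
        | none => d.get? k := by
  induction es generalizing d with
  | nil => simp
  | cons e es ih =>
      simp only [List.foldl_cons, List.reverse_cons, List.find?_append]
      rw [ih]
      cases h : es.reverse.find? (fun e => e.1 == k) with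
      | some e' => simp
      | none =>
          simp only [Option.none_or]
          by_cases hk : k = e.1
          · subst hk
            simp [PySem.Dict.get?_insert_self]
          · rw [PySem.Dict.get?_insert_of_ne _ _ hk]
            have : (e.1 == k) = false := beq_eq_false_iff_ne.mpr (Ne.symm hk)
            simp [this]

-- A's nested fold over prefills_data builds exactly the fold of inserts over the flat entry list
theorem pv_nested_eq_flat (prefills_data : List (String × List (String × List (List (String × String)))))
    (d : PySem.Dict (Option String × Option String × Option String) String) :
    prefills_data.foldl (fun m tp =>
      if tp.1 == "metadata" then m
      else tp.2.foldl (fun m sp =>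
        sp.2.foldl (fun m item =>
          m.insert (some tp.1, some sp.1, (PySem.Dict.mk item).get? "level")
                   ((PySem.Dict.mk item).getD "prefill" "")) m) m) d
    = (pvEntries prefills_data).foldl (fun m e => m.insert e.1 e.2) d := by
  rw [pvEntries, List.foldl_flatMap]
  congr 1
  funext m tp
  by_cases hc : (tp.1 == "metadata") = true
  · simp [hc]
  · simp [hc, List.foldl_flatMap, List.foldl_map]

-- A returns, per question, the original dict with "prefill" set to pvLast of its key
theorem pv_A_char (questions : List (List (String × String))) (prefills_data : List (String × List (String × List (List (String × String))))) :
    match_prefills_to_questions questions prefills_data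
      = questions.map (fun q => ((PySem.Dict.mk q).insert "prefill" (pvLast prefills_data (pvKey q))).items) := by
  unfold match_prefills_to_questions
  apply List.map_congr_left
  intro q _
  rw [pv_nested_eq_flat]
  rw [show ((PySem.Dict.mk q).get? "topic", (PySem.Dict.mk q).get? "subtopic", (PySem.Dict.mk q).get? "level") = pvKey q from rfl]
  have hget := pv_foldl_insert_get? (pvEntries prefills_data) PySem.Dict.empty (pvKey q)
  set m := (pvEntries prefills_data).foldl (fun m e => m.insert e.1 e.2) PySem.Dict.empty with hm
  unfold pvLast
  show (if m.contains (pvKey q) = true then ((PySem.Dict.mk q).insert "prefill" (m.getD (pvKey q) "")).items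
        else ((PySem.Dict.mk q).insert "prefill" "").items) = _
  cases hfind : (pvEntries prefills_data).reverse.find? (fun e => e.1 == pvKey q) with
  | some e =>
      have h1 : m.get? (pvKey q) = some e.2 := by rw [hget, hfind]
      have hc : m.contains (pvKey q) = true := by
        rw [PySem.Dict.contains_eq_isSome_get?, h1]; rfl
      rw [hc, if_pos rfl, PySem.Dict.getD_eq_get?_getD, h1]
      rfl
  | none =>
      have h1 : m.get? (pvKey q) = none := by rw [hget, hfind]; simp
      have hc : m.contains (pvKey q) = false := by
        rw [PySem.Dict.contains_eq_isSome_get?, h1]; rfl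
      rw [hc]
      simp

-- ---- B side ----

-- the key read through the first-pass insert of "prefill" is the question's key
theorem pv_key_after_init (q : List (String × String)) :
    ((((PySem.Dict.mk q).insert "prefill" "").get? "topic",
      ((PySem.Dict.mk q).insert "prefill" "").get? "subtopic",
      ((PySem.Dict.mk q).insert "prefill" "").get? "level")) = pvKey q := by
  unfold pvKey
  rw [PySem.Dict.get?_insert_of_ne _ _ (by decide),
      PySem.Dict.get?_insert_of_ne _ _ (by decide),
      PySem.Dict.get?_insert_of_ne _ _ (by decide)]

-- membership in enumerate
theorem pv_mem_enumerate (xs : List (List (String × String))) (s : Int) (p : Int × List (String × String)) :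
    p ∈ PySem.List.enumerate xs s ↔ ∃ j : Nat, ∃ h : j < xs.length, p.1 = s + j ∧ p.2 = xs[j] := by
  induction xs generalizing s with
  | nil => simp [PySem.List.enumerate]
  | cons x xs ih =>
      rw [PySem.List.enumerate_cons]
      constructor
      · intro hp
        rcases List.mem_cons.mp hp with h | h
        · exact ⟨0, by simp, by simp [h]⟩
        · rcases (ih (s + 1)).mp h with ⟨j, hj, h1, h2⟩
          exact ⟨j + 1, by simpa using hj, by push_cast at h1 ⊢; omega, by simpa using h2⟩
      · rintro ⟨j, hj, h1, h2⟩
        cases j with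
        | zero =>
            apply List.mem_cons.mpr; left
            simp at h1 h2
            exact Prod.ext h1 h2
        | succ j =>
            apply List.mem_cons.mpr; right
            apply (ih (s + 1)).mpr
            exact ⟨j, by simpa using hj, by push_cast at h1 ⊢; omega, by simpa using h2⟩

-- the index-group list B builds for key k
def pvGroup (questions : List (List (String × String))) (k : Option String × Option String × Option String) : List Int :=
  ((PySem.List.enumerate questions).filter (fun iq => pvKey iq.2 == k)).map (fun x => x.1)

-- the first pass: pair state splits into the initialized dicts and the group map
theorem pv_first_pass (questions : List (List (String × String))) :
    (PySem.List.enumerate questions).foldl pvInitStep ([], PySem.Dict.empty)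
      = (questions.map (fun q => (PySem.Dict.mk q).insert "prefill" ""),
         (PySem.List.enumerate questions).foldl
           (fun g iq => g.modify (pvKey iq.2) [] (fun l => l ++ [iq.1])) PySem.Dict.empty) := by
  have hstep : pvInitStep = fun (st : List (PySem.Dict String String) × PySem.Dict (Option String × Option String × Option String) (List Int)) (iq : Int × List (String × String)) =>
      ((fun (a : List (PySem.Dict String String)) (iq : Int × List (String × String)) => a ++ [(PySem.Dict.mk iq.2).insert "prefill" ""]) st.1 iq,
       (fun (g : PySem.Dict (Option String × Option String × Option String) (List Int)) (iq : Int × List (String × String)) => g.modify (pvKey iq.2) [] (fun l => l ++ [iq.1])) st.2 iq) := by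
    funext st iq
    unfold pvInitStep
    rw [pv_key_after_init]
  rw [hstep, PySem.List.foldl_prod_mk
        (fun (a : List (PySem.Dict String String)) (iq : Int × List (String × String)) => a ++ [(PySem.Dict.mk iq.2).insert "prefill" ""])
        (fun (g : PySem.Dict (Option String × Option String × Option String) (List Int)) (iq : Int × List (String × String)) => g.modify (pvKey iq.2) [] (fun l => l ++ [iq.1]))
        (PySem.List.enumerate questions) [] PySem.Dict.empty]
  congr 1
  rw [PySem.List.foldl_append_singleton_eq_map, List.nil_append]
  rw [show (fun (iq : Int × List (String × String)) => (PySem.Dict.mk iq.2).insert "prefill" "")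
        = (fun q => (PySem.Dict.mk q).insert "prefill" "") ∘ (fun (iq : Int × List (String × String)) => iq.2) from rfl,
      ← List.map_map, PySem.List.map_snd_enumerate]

-- the group map's lookup is pvGroup
theorem pv_groups_getD (questions : List (List (String × String))) (k : Option String × Option String × Option String) :
    ((PySem.List.enumerate questions).foldl
        (fun g iq => g.modify (pvKey iq.2) [] (fun l => l ++ [iq.1])) PySem.Dict.empty).getD k []
      = pvGroup questions k := by
  have h0 : (PySem.List.enumerate questions).foldl
        (fun g iq => g.modify (pvKey iq.2) [] (fun l => l ++ [iq.1])) PySem.Dict.empty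
      = ((PySem.List.enumerate questions).map (fun iq => (pvKey iq.2, iq.1))).foldl
        (fun g p => g.modify p.1 [] (fun l => l ++ [p.2])) PySem.Dict.empty := by
    rw [List.foldl_map]
  rw [h0, PySem.Dict.getD_foldl_modify_append, PySem.Dict.getD_empty, List.nil_append,
      List.filter_map, List.map_map]
  rfl

-- pvGroup's members: exactly the casts of indices whose question has key k
theorem pv_mem_pvGroup (questions : List (List (String × String))) (k : Option String × Option String × Option String)
    (j : Nat) (hj : j < questions.length) :
    ((j : Int) ∈ pvGroup questions k) ↔ pvKey questions[j] = k := by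
  unfold pvGroup
  constructor
  · intro h
    rcases List.mem_map.mp h with ⟨iq, hmem, hfst⟩
    rcases List.mem_filter.mp hmem with ⟨henum, hkey⟩
    rcases (pv_mem_enumerate questions 0 iq).mp henum with ⟨j', hj', h1, h2⟩
    have hjj : j' = j := by
      rw [h1] at hfst
      omega
    subst hjj
    rw [h2] at hkey
    exact eq_of_beq hkey
  · intro h
    apply List.mem_map.mpr
    refine ⟨((j : Int), questions[j]), List.mem_filter.mpr ⟨?_, by simp [h]⟩, rfl⟩
    exact (pv_mem_enumerate questions 0 _).mpr ⟨j, hj, by simp, rfl⟩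

theorem pv_pvGroup_shape (questions : List (List (String × String))) (k : Option String × Option String × Option String) :
    (pvGroup questions k).Nodup ∧ ∀ x ∈ pvGroup questions k, ∃ i : Nat, i < questions.length ∧ x = (i : Int) := by
  constructor
  · have hsub : List.Sublist (pvGroup questions k) ((PySem.List.enumerate questions).map (fun x => x.1)) :=
      List.Sublist.map _ List.filter_sublist
    apply List.Nodup.sublist hsub
    rw [PySem.List.map_fst_enumerate]
    exact PySem.List.nodup_pyRange_one _ _
  · intro x hx
    have hx2 : x ∈ (PySem.List.enumerate questions).map (fun x => x.1) :=
      (List.Sublist.map (fun (x : Int × List (String × String)) => x.1) List.filter_sublist).mem hx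
    rw [PySem.List.map_fst_enumerate] at hx2
    have := PySem.List.mem_pyRange_one.mp hx2
    exact ⟨x.toNat, by omega, by omega⟩

-- updating every index of a nodup in-range list: pointwise effect
theorem pv_setAll (l : List Int) (v : String) (arr : List (PySem.Dict String String))
    (hl : ∀ x ∈ l, ∃ i : Nat, i < arr.length ∧ x = (i : Int)) (hnd : l.Nodup) :
    (l.foldl (fun a i => PySem.List.pySetD a i ((PySem.List.pyGetD a i PySem.Dict.empty).insert "prefill" v)) arr).length = arr.length
    ∧ ∀ j : Nat,
      (l.foldl (fun a i => PySem.List.pySetD a i ((PySem.List.pyGetD a i PySem.Dict.empty).insert "prefill" v)) arr)[j]?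
        = arr[j]?.map (fun d => if ((j : Int) ∈ l) then d.insert "prefill" v else d) := by
  induction l generalizing arr with
  | nil =>
      refine ⟨rfl, fun j => ?_⟩
      simp
  | cons i l ih =>
      rcases hl i (by simp) with ⟨i0, hi0, rfl⟩
      have hget : PySem.List.pyGetD arr ((i0 : Nat) : Int) PySem.Dict.empty = arr[i0] := by
        rw [PySem.List.pyGetD_eq_getElem arr _ (by omega) (by omega)]
        simp
      have harr' : PySem.List.pySetD arr ((i0 : Nat) : Int) ((PySem.List.pyGetD arr ((i0 : Nat) : Int) PySem.Dict.empty).insert "prefill" v)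
          = arr.set i0 (arr[i0].insert "prefill" v) := by
        rw [hget, PySem.List.pySetD_natCast]
      have hl' : ∀ x ∈ l, ∃ i : Nat, i < (arr.set i0 (arr[i0].insert "prefill" v)).length ∧ x = (i : Int) := by
        intro x hx; rcases hl x (by simp [hx]) with ⟨i, hi, rfl⟩; exact ⟨i, by simpa using hi, rfl⟩
      rcases ih (arr.set i0 (arr[i0].insert "prefill" v)) hl' hnd.of_cons with ⟨ihlen, ihval⟩
      rw [List.foldl_cons, harr']
      refine ⟨by rw [ihlen]; simp, fun j => ?_⟩
      rw [ihval j]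
      by_cases hji : j = i0
      · subst hji
        have hiota : ((j : Int) ∈ (j : Int) :: l) := by simp
        have hnotin : ¬ ((j : Int) ∈ l) := (List.nodup_cons.mp hnd).1
        rw [List.getElem?_set_self (by omega), List.getElem?_eq_getElem (by omega)]
        simp [hnotin, hiota]
      · rw [List.getElem?_set_ne (by omega)]
        by_cases hm : (j : Int) ∈ l
        · simp [hm, List.mem_cons]
        · have hnc : ¬ ((j : Int) ∈ ((i0 : Nat) : Int) :: l) := by
            simp only [List.mem_cons]
            rintro (h | h)
            · exact hji (by exact_mod_cast h)
            · exact hm h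
          simp [hm, hnc]
  
-- folding all entries through the group updates: pointwise it is the filtered insert fold
theorem pv_entries_fold (questions : List (List (String × String)))
    (es : List ((Option String × Option String × Option String) × String))
    (arr : List (PySem.Dict String String)) (hlen : arr.length = questions.length) :
    (es.foldl (fun arr e =>
      (pvGroup questions e.1).foldl
        (fun a i => PySem.List.pySetD a i ((PySem.List.pyGetD a i PySem.Dict.empty).insert "prefill" e.2)) arr) arr).length = questions.length
    ∧ ∀ (j : Nat) (hj : j < questions.length),
      (es.foldl (fun arr e =>
        (pvGroup questions e.1).foldl
          (fun a i => PySem.List.pySetD a i ((PySem.List.pyGetD a i PySem.Dict.empty).insert "prefill" e.2)) arr) arr)[j]?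
        = arr[j]?.map (fun d => (es.filter (fun e => e.1 == pvKey (questions[j]'hj))).foldl
            (fun d e => d.insert "prefill" e.2) d) := by
  induction es generalizing arr with
  | nil =>
      refine ⟨hlen, fun j hj => ?_⟩
      simp
  | cons e es ih =>
      have hshape := pv_pvGroup_shape questions e.1
      rcases pv_setAll (pvGroup questions e.1) e.2 arr
        (by intro x hx; rcases hshape.2 x hx with ⟨i, hi, rfl⟩; exact ⟨i, by omega, rfl⟩) hshape.1 with ⟨hslen, hsval⟩
      rw [List.foldl_cons]
      set arr' := (pvGroup questions e.1).foldl
        (fun a i => PySem.List.pySetD a i ((PySem.List.pyGetD a i PySem.Dict.empty).insert "prefill" e.2)) arr with harr'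
      rcases ih arr' (by omega) with ⟨ihlen, ihval⟩
      refine ⟨ihlen, fun j hj => ?_⟩
      rw [ihval j hj, hsval j]
      rw [Option.map_map]
      apply congrArg (fun f => Option.map f arr[j]?)
      funext d
      by_cases hk : pvKey (questions[j]'hj) = e.1
      · rw [List.filter_cons_of_pos (by simp [hk])]
        simp only [Function.comp_apply, if_pos ((pv_mem_pvGroup questions e.1 j hj).mpr hk)]
        rfl
      · rw [List.filter_cons_of_neg (by simp; exact fun h => hk h.symm)]
        simp only [Function.comp_apply,
          if_neg (fun h => hk ((pv_mem_pvGroup questions e.1 j hj).mp h))]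

-- B's nested second pass is the entries fold over the flat entry list
theorem pv_nested_eq_flat_B (questions : List (List (String × String)))
    (prefills_data : List (String × List (String × List (List (String × String)))))
    (arr : List (PySem.Dict String String)) :
    prefills_data.foldl (fun arr tp =>
      if tp.1 == "metadata" then arr
      else tp.2.foldl (fun arr sp =>
        sp.2.foldl (fun arr item =>
          (pvGroup questions (some tp.1, some sp.1, (PySem.Dict.mk item).get? "level")).foldl
            (fun arr i =>
              PySem.List.pySetD arr i ((PySem.List.pyGetD arr i PySem.Dict.empty).insert "prefill" ((PySem.Dict.mk item).getD "prefill" "")))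
            arr) arr) arr) arr
    = (pvEntries prefills_data).foldl (fun arr e =>
        (pvGroup questions e.1).foldl
          (fun a i => PySem.List.pySetD a i ((PySem.List.pyGetD a i PySem.Dict.empty).insert "prefill" e.2)) arr) arr := by
  rw [pvEntries, List.foldl_flatMap]
  congr 1
  funext arr tp
  by_cases hc : (tp.1 == "metadata") = true
  · simp [hc]
  · simp [hc, List.foldl_flatMap, List.foldl_map]

-- repeated overwrites of "prefill" collapse to one insert of the last value
theorem pv_collapse (ms : List ((Option String × Option String × Option String) × String))
    (d : PySem.Dict String String) (v0 : String) :
    ms.foldl (fun d e => d.insert "prefill" e.2) (d.insert "prefill" v0)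
      = d.insert "prefill" (match ms.getLast? with | some e => e.2 | none => v0) := by
  induction ms generalizing v0 with
  | nil => rfl
  | cons e ms ih =>
      rw [List.foldl_cons, PySem.Dict.insert_insert_self, ih]
      cases hms : ms.getLast? with
      | some e' => simp [List.getLast?_cons, hms]
      | none =>
          have h0 : ms = [] := List.getLast?_eq_none_iff.mp hms
          subst h0
          rfl

-- reverse.find? is getLast? of the filter
theorem pv_find_rev (es : List ((Option String × Option String × Option String) × String))
    (k : Option String × Option String × Option String) :
    es.reverse.find? (fun e => e.1 == k) = (es.filter (fun e => e.1 == k)).getLast? := by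
  rw [List.getLast?_eq_head?_reverse, ← List.filter_reverse, List.head?_filter]

-- B returns, per question, the original dict with "prefill" set to pvLast of its key
theorem pv_B_char (questions : List (List (String × String))) (prefills_data : List (String × List (String × List (List (String × String))))) :
    match_prefills_to_questions_alt questions prefills_data
      = questions.map (fun q => ((PySem.Dict.mk q).insert "prefill" (pvLast prefills_data (pvKey q))).items) := by
  unfold match_prefills_to_questions_alt
  simp only [pv_first_pass, pv_groups_getD]
  rw [pv_nested_eq_flat_B]
  rcases pv_entries_fold questions (pvEntries prefills_data)
      (questions.map (fun q => (PySem.Dict.mk q).insert "prefill" "")) (by simp) with ⟨hlen, hval⟩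
  apply List.ext_getElem?
  intro j
  rw [List.getElem?_map, List.getElem?_map]
  by_cases hj : j < questions.length
  · rw [hval j hj, List.getElem?_map, List.getElem?_eq_getElem hj]
    simp only [Option.map_some]
    apply congrArg some
    show (((pvEntries prefills_data).filter (fun e => e.1 == pvKey (questions[j]'hj))).foldl
        (fun d e => d.insert "prefill" e.2) ((PySem.Dict.mk (questions[j]'hj)).insert "prefill" "")).items
      = ((PySem.Dict.mk (questions[j]'hj)).insert "prefill" (pvLast prefills_data (pvKey (questions[j]'hj)))).items
    rw [pv_collapse]
    unfold pvLast
    rw [pv_find_rev]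
  · have h1 : ((pvEntries prefills_data).foldl (fun arr e =>
        (pvGroup questions e.1).foldl
          (fun a i => PySem.List.pySetD a i ((PySem.List.pyGetD a i PySem.Dict.empty).insert "prefill" e.2)) arr)
        (questions.map (fun q => (PySem.Dict.mk q).insert "prefill" "")))[j]? = none := by
      rw [List.getElem?_eq_none_iff]
      omega
    have h2 : questions[j]? = none := by
      rw [List.getElem?_eq_none_iff]
      omega
    rw [h1, h2]
    rfl

-- ===== VERDICT (by name: the statement is the Claim_ definition above) =====
theorem match_prefills_to_questions_spec : Claim_equal_match_prefills_to_questions := by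
  intro questions prefills_data _
  unfold Spec_match_prefills_to_questions
  rw [pv_A_char, pv_B_char]
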